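-- pv_equiv track=rewrite | github.com/sparkvisionsa/ValueTech-Frontend | src/scripts/submission/createMacros.py | calculate_tab_batches
-- ===== SOURCE A (Python) =====
-- def calculate_tab_batches(total_macros, max_tabs, batch_size=10):
--     if total_macros <= batch_size:
--         return [total_macros]
--
--     required_tabs = (total_macros + batch_size - 1) // batch_size
--     tabs_to_use = min(required_tabs, max_tabs)
--
--     base, extra = divmod(total_macros, tabs_to_use)
--     result = []
--     for i in range(tabs_to_use):
--         size = base + (1 if i < extra else 0)
--         result.append(size)
--     return result
-- ===== SOURCE B (Python) =====
-- def calculate_tab_batches(total_macros, max_tabs, batch_size=10):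
--     if total_macros <= batch_size:
--         return [total_macros]
--     tabs_left = min((total_macros + batch_size - 1) // batch_size, max_tabs)
--     result = []
--     remaining = total_macros
--     while tabs_left > 0:
--         take = -(-remaining // tabs_left)   # ceil(remaining / tabs_left)
--         result.append(take)
--         remaining -= take
--         tabs_left -= 1
--     return result
-- ===== Notes on version B (the rewrite author's own statement) =====
-- stated objective: alternative
-- what changed: B distributes greedily: instead of divmod-splitting the total into base/extra counts up front, it repeatedly takes ceil(remaining/tabs_left) from a running remainder, so the even split emerges from the sequential invariant rather than a precomputed quotient/remainder.
import Mathlib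
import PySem

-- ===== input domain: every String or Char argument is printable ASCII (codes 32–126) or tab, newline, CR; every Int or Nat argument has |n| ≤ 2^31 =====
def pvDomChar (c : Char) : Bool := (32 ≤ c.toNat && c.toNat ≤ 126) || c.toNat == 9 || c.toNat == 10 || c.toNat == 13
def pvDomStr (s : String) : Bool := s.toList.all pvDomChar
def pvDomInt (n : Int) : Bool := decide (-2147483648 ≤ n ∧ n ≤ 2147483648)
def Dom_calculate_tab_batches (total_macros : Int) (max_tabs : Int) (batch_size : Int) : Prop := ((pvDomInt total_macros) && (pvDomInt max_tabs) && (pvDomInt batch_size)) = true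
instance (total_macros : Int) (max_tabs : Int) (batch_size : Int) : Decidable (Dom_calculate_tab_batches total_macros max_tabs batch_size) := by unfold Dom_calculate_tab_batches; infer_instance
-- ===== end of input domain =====

-- B distributes greedily by repeated ceiling division of a running remainder,
-- instead of A's up-front divmod split; equal return values are proved on Pre_.

-- ===== PORT A =====
def calculate_tab_batches (total_macros : Int) (max_tabs : Int) (batch_size : Int) : List Int :=
  if total_macros ≤ batch_size then [total_macros]
  else
    let required_tabs := PySem.Int.floordiv (total_macros + batch_size - 1) batch_size
    let tabs_to_use := min required_tabs max_tabs
    let base := PySem.Int.floordiv total_macros tabs_to_use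
    let extra := PySem.Int.mod total_macros tabs_to_use
    (PySem.List.pyRange 0 tabs_to_use 1).foldl
      (fun result i => result ++ [base + (if i < extra then 1 else 0)]) []

-- ===== PORT B =====
-- the 'while tabs_left > 0' loop of Source B: take = ceil(remaining/tabs_left), append, recurse
def pvGreedy (remaining : Int) (tabs_left : Int) : List Int :=
  if h : 0 < tabs_left then
    let take := -(PySem.Int.floordiv (-remaining) tabs_left)
    take :: pvGreedy (remaining - take) (tabs_left - 1)
  else []
termination_by tabs_left.toNat
decreasing_by omega

def calculate_tab_batches_alt (total_macros : Int) (max_tabs : Int) (batch_size : Int) : List Int :=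
  if total_macros ≤ batch_size then [total_macros]
  else
    let tabs_left := min (PySem.Int.floordiv (total_macros + batch_size - 1) batch_size) max_tabs
    pvGreedy total_macros tabs_left

-- ===== PRECONDITION & SPEC =====
-- Pre_ excludes exactly the inputs where Python A raises ZeroDivisionError:
-- total_macros > batch_size with batch_size = 0, or with min(required_tabs, max_tabs) = 0.
def Pre_calculate_tab_batches (total_macros : Int) (max_tabs : Int) (batch_size : Int) : Prop :=
  total_macros ≤ batch_size ∨
    (batch_size ≠ 0 ∧ min (PySem.Int.floordiv (total_macros + batch_size - 1) batch_size) max_tabs ≠ 0)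
instance (total_macros : Int) (max_tabs : Int) (batch_size : Int) : Decidable (Pre_calculate_tab_batches total_macros max_tabs batch_size) := by unfold Pre_calculate_tab_batches; infer_instance

def pvWitness_calculate_tab_batches : Int × Int × Int := (25, 3, 10)

def Spec_calculate_tab_batches (total_macros : Int) (max_tabs : Int) (batch_size : Int) (out : List Int) : Prop := out = calculate_tab_batches_alt total_macros max_tabs batch_size
instance (total_macros : Int) (max_tabs : Int) (batch_size : Int) (out : List Int) : Decidable (Spec_calculate_tab_batches total_macros max_tabs batch_size out) := by unfold Spec_calculate_tab_batches; infer_instance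

-- ===== CLAIM (what is proved, stated in full; the proofs are below) =====
def Claim_equal_calculate_tab_batches : Prop := ∀ (total_macros : Int) (max_tabs : Int) (batch_size : Int), Dom_calculate_tab_batches total_macros max_tabs batch_size → Pre_calculate_tab_batches total_macros max_tabs batch_size → Spec_calculate_tab_batches total_macros max_tabs batch_size (calculate_tab_batches total_macros max_tabs batch_size)

-- ===== LEMMAS AND PROOFS =====

-- A's loop, read element by element, is two replicated blocks
lemma pv_blocks (base E : Int) (N : Nat) (h0 : 0 ≤ E) (hEN : E ≤ (N : Int)) :
    (List.range N).map (fun (k : Nat) => base + (if 0 + (k : Int) < E then 1 else 0)) =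
      List.replicate E.toNat (base + 1) ++ List.replicate (N - E.toNat) base := by
  apply List.ext_getElem
  · simp; omega
  · intro k h1 h2
    simp only [List.getElem_map, List.getElem_range, zero_add]
    by_cases hk : (k : Int) < E
    · rw [List.getElem_append_left (by simp; omega)]
      simp [hk]
    · rw [List.getElem_append_right (by simp; omega)]
      simp [hk]

-- B's greedy loop on remaining = base*N + e with 0 ≤ e < N (or e = N = 0)
-- produces the same two blocks
lemma pv_greedy_blocks (N : Nat) : ∀ (base e : Int), 0 ≤ e → e ≤ (N : Int) → (e = (N : Int) → N = 0) →
    pvGreedy (base * N + e) N = List.replicate e.toNat (base + 1) ++ List.replicate (N - e.toNat) base := by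
  induction N with
  | zero =>
    intro base e h0 h1 _
    have he : e = 0 := le_antisymm (by exact_mod_cast h1) h0
    rw [pvGreedy]
    simp [he]
  | succ n ih =>
    intro base e h0 h1 h2
    have hpos : (0 : Int) < ((n + 1 : Nat) : Int) := by exact_mod_cast Nat.succ_pos n
    rw [pvGreedy, dif_pos hpos]
    by_cases he : 0 < e
    · -- take = base + 1
      have htake : -(PySem.Int.floordiv (-(base * ((n+1 : Nat) : Int) + e)) ((n+1 : Nat) : Int)) = base + 1 := by
        rw [PySem.Int.neg_floordiv_neg_eq_iff_of_pos hpos]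
        constructor <;> nlinarith [hpos, he, h1]
      have hlt : e < ((n + 1 : Nat) : Int) := by
        rcases lt_or_eq_of_le h1 with h | h
        · exact h
        · exact absurd (h2 h) (Nat.succ_ne_zero n)
      simp only [htake]
      have harg : base * ((n+1 : Nat) : Int) + e - (base + 1) = base * (n : Int) + (e - 1) := by
        push_cast; ring
      have harg2 : ((n+1 : Nat) : Int) - 1 = (n : Int) := by push_cast; ring
      rw [harg, harg2, ih base (e - 1) (by omega) (by push_cast at hlt ⊢; omega) (by push_cast at hlt ⊢; omega)]
      have hrep : List.replicate e.toNat (base + 1) = (base + 1) :: List.replicate (e - 1).toNat (base + 1) := by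
        have : e.toNat = (e - 1).toNat + 1 := by omega
        rw [this, List.replicate_succ]
      rw [hrep]
      have hcnt : n + 1 - e.toNat = n - (e - 1).toNat := by omega
      rw [hcnt]
      simp
    · -- e = 0, take = base
      have he0 : e = 0 := le_antisymm (by omega) h0
      have htake : -(PySem.Int.floordiv (-(base * ((n+1 : Nat) : Int) + e)) ((n+1 : Nat) : Int)) = base := by
        rw [PySem.Int.neg_floordiv_neg_eq_iff_of_pos hpos]
        constructor <;> nlinarith [hpos, he0]
      simp only [htake]
      have harg : base * ((n+1 : Nat) : Int) + e - base = base * (n : Int) + 0 := by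
        rw [he0]; push_cast; ring
      have harg2 : ((n+1 : Nat) : Int) - 1 = (n : Int) := by push_cast; ring
      rw [harg, harg2, ih base 0 le_rfl (by exact_mod_cast Nat.zero_le n)
        (by intro h; exact_mod_cast h.symm)]
      simp [he0, List.replicate_succ]

theorem calculate_tab_batches_spec : Claim_equal_calculate_tab_batches := by
  intro t m b _ hpre
  unfold Spec_calculate_tab_batches calculate_tab_batches calculate_tab_batches_alt
  by_cases hle : t ≤ b
  · simp [hle]
  · simp only [if_neg hle]
    set n := min (PySem.Int.floordiv (t + b - 1) b) m with hn
    have hne : n ≠ 0 := by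
      rcases hpre with h | ⟨_, h⟩
      · exact absurd h hle
      · exact h
    set base := PySem.Int.floordiv t n with hbase
    set e := PySem.Int.mod t n with he
    rcases lt_or_gt_of_ne hne with hneg | hpos
    · -- tabs_to_use < 0: both sides are []
      rw [PySem.List.pyRange_one_eq_nil (by omega), pvGreedy, dif_neg (by omega)]
      simp
    · -- tabs_to_use > 0
      have hb0 : 0 ≤ e := PySem.Int.mod_nonneg t hpos
      have hb1 : e < n := PySem.Int.mod_lt t hpos
      rw [PySem.List.foldl_append_singleton_eq_map, List.nil_append,
          PySem.List.pyRange_one, List.map_map]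
      simp only [Function.comp_def]
      have hEN : e ≤ (((n - 0).toNat : Nat) : Int) := by omega
      rw [pv_blocks base e (n - 0).toNat hb0 hEN]
      have hsplit : base * ((n.toNat : Nat) : Int) + e = t := by
        have h := PySem.Int.floordiv_mul_add_mod t n
        rw [← hbase, ← he] at h
        have hcast : ((n.toNat : Nat) : Int) = n := by omega
        rw [hcast]; linarith
      have hgr := pv_greedy_blocks n.toNat base e hb0 (by omega) (by omega)
      rw [hsplit] at hgr
      have hcast2 : ((n.toNat : Nat) : Int) = n := by omega
      rw [hcast2] at hgr
      rw [hgr]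
      have : (n - 0).toNat = n.toNat := by omega
      rw [this]
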